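-- pv_equiv track=rewrite | github.com/atvKail/solve | olympiads/traning/УрфуТренировки/17/H.py | solve
-- ===== SOURCE A (Python) =====
-- def np_base3(n):
--     if n == 0:
--         return "0"
--     digits = []
--     while n:
--         digits.append(str(n % 3))
--         n //= 3
--     return "".join(reversed(digits))
--
-- def solve(n):
--     tern = list(map(int, list(np_base3(n))))
--     length = len(tern)
--
--     if 2 not in tern:
--         return n
--
--     pos = tern.index(2)
--
--     while pos > 0 and tern[pos - 1] == 1:
--         pos -= 1
--
--     if pos == 0:
--         tern = [1] + [0] * length
--     else:
--         tern[pos - 1] = 1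
--         for i in range(pos, length):
--             tern[i] = 0
--
--     res = 0
--     for d in tern:
--         res = res * 3 + d
--     return res
-- ===== SOURCE B (Python) =====
-- def _digits3(n):
--     # MSB-first ternary digits of n (empty list for 0)
--     return [] if n == 0 else _digits3(n // 3) + [n % 3]
--
-- def _digits2(n):
--     # MSB-first binary digits of n (empty list for 0)
--     return [] if n == 0 else _digits2(n // 2) + [n % 2]
--
-- def solve(n):
--     ds = _digits3(n)
--     if 2 not in ds:
--         return n
--     p = ds.index(2)
--     # read the (0/1) prefix before the first 2 as a binary number, add one
--     v = 0
--     for d in ds[:p]: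
--         v = 2 * v + d
--     bits = _digits2(v + 1)
--     # the answer's ternary digits are those bits followed by len(ds) - p zeros
--     res = 0
--     for d in bits:
--         res = 3 * res + d
--     return res * 3 ** (len(ds) - p)
-- ===== Notes on version B (the rewrite author's own statement) =====
-- stated objective: alternative
-- what changed: Instead of A's string base-3 rendering, backward scan over the run of 1s before the first 2 and in-place zero-fill of the digit list, B reads the 0/1 prefix before the first 2 as a binary number, adds one, and evaluates its binary digits in base 3 shifted by a power of 3 (the carry and the all-ones overflow fall out of the single integer increment).
import Mathlib
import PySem

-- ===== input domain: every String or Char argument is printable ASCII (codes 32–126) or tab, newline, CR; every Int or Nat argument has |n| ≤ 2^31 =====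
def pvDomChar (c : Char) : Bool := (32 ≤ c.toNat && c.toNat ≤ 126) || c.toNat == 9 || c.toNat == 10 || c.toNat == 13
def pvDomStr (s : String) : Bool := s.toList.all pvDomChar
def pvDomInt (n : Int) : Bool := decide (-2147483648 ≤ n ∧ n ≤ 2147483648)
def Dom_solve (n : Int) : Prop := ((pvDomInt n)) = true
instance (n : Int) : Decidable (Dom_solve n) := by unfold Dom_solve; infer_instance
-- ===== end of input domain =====

-- B replaces A's backward 1-run scan and in-place zero-fill of the ternary digit list
-- by a single binary increment of the 0/1 prefix before the first 2 (alternative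
-- decomposition, same asymptotic cost). Pre_solve: A's while/recursion never
-- terminates for n < 0, so only 0 ≤ n is claimed.


-- ===== PORT A =====
-- np_base3's while loop: digits.append(str(n % 3)); n //= 3.  The Python guard is
-- `while n`; for n < 0 that loop never terminates, so the port stops there too
-- (guard `0 < n` only totalizes the function; n < 0 is outside Pre_solve).
def np_base3_loop (n : Int) (digits : List String) : List String :=
  if h : 0 < n then
    np_base3_loop (PySem.Int.floordiv n 3) (digits ++ [PySem.Int.toStr (PySem.Int.mod n 3)])
  else digits
termination_by n.toNat
decreasing_by
  have h1 : PySem.Int.floordiv n 3 = n / 3 := PySem.Int.floordiv_eq_ediv_of_pos (by omega)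
  rw [h1]; omega

def np_base3 (n : Int) : String :=
  if n = 0 then "0" else PySem.Str.join "" (np_base3_loop n []).reverse

-- the `while pos > 0 and tern[pos - 1] == 1: pos -= 1` loop; tern[pos-1] is always
-- in range when the condition is evaluated (0 < pos ≤ len(tern)), so pyGetD is exact
def solve_scan (tern : List Int) (pos : Int) : Int :=
  if h : 0 < pos ∧ PySem.List.pyGetD tern (pos - 1) 0 = 1 then solve_scan tern (pos - 1)
  else pos
termination_by pos.toNat
decreasing_by omega

def solve (n : Int) : Int :=
  -- list(map(int, list(np_base3(n)))): every character is a digit, int(c) = ofChars? [c]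
  let tern : List Int := (np_base3 n).toList.map (fun c => (PySem.Int.ofChars? [c]).getD 0)
  let length : Int := PySem.List.len tern
  if tern.contains 2 = false then n
  else
    -- tern.index(2) cannot raise here (2 ∈ tern), so the .getD 0 default is never used
    let pos0 : Int := ((PySem.List.index? tern 2).getD 0 : Nat)
    let pos : Int := solve_scan tern pos0
    let tern2 : List Int :=
      if pos = 0 then [(1 : Int)] ++ PySem.List.pyRepeat [(0 : Int)] length
      else (PySem.List.pyRange pos length 1).foldl
             (fun t i => PySem.List.pySetD t i 0) (PySem.List.pySetD tern (pos - 1) 1)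
    tern2.foldl (fun res d => res * 3 + d) 0

-- ===== PORT B =====
-- _digits3: `[] if n == 0 else _digits3(n // 3) + [n % 3]`; for n < 0 the Python
-- recursion never terminates, the guard 0 < n only totalizes (outside Pre_solve)
def toDigits3 (n : Int) : List Int :=
  if h : 0 < n then toDigits3 (PySem.Int.floordiv n 3) ++ [PySem.Int.mod n 3] else []
termination_by n.toNat
decreasing_by
  have h1 : PySem.Int.floordiv n 3 = n / 3 := PySem.Int.floordiv_eq_ediv_of_pos (by omega)
  rw [h1]; omega

def toDigits2 (n : Int) : List Int :=
  if h : 0 < n then toDigits2 (PySem.Int.floordiv n 2) ++ [PySem.Int.mod n 2] else []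
termination_by n.toNat
decreasing_by
  have h1 : PySem.Int.floordiv n 2 = n / 2 := PySem.Int.floordiv_eq_ediv_of_pos (by omega)
  rw [h1]; omega

def solve_alt (n : Int) : Int :=
  let ds : List Int := toDigits3 n
  if ds.contains 2 = false then n
  else
    -- ds.index(2) cannot raise here (2 ∈ ds), so the .getD 0 default is never used
    let p : Nat := (PySem.List.index? ds 2).getD 0
    let v : Int := (PySem.List.slice ds none (some (p : Int))).foldl (fun v d => 2 * v + d) 0
    let bits : List Int := toDigits2 (v + 1)
    let res : Int := bits.foldl (fun r d => 3 * r + d) 0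
    -- 3 ** (len(ds) - p): p < len(ds), so the Nat subtraction is exact
    res * 3 ^ (ds.length - p)

-- ===== PRECONDITION & SPEC =====
-- Pre_solve excludes n < 0, on which A's `while n` loop never terminates (A does
-- not return there); A returns on every n ≥ 0.
def Pre_solve (n : Int) : Prop := 0 ≤ n
instance (n : Int) : Decidable (Pre_solve n) := by unfold Pre_solve; infer_instance
def pvWitness_solve : Int := 5

def Spec_solve (n : Int) (out : Int) : Prop := out = solve_alt n
instance (n : Int) (out : Int) : Decidable (Spec_solve n out) := by unfold Spec_solve; infer_instance

-- ===== CLAIM (what is proved, stated in full; the proofs are below) =====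
def Claim_equal_solve : Prop := ∀ (n : Int), Dom_solve n → Pre_solve n → Spec_solve n (solve n)


-- ===== LEMMAS AND PROOFS =====

-- base-3 / base-2 Horner evaluation of a digit list (proof-side abbreviations)
def h3 (l : List Int) : Int := l.foldl (fun r d => 3 * r + d) 0
def h2v (l : List Int) : Int := l.foldl (fun v d => 2 * v + d) 0

-- the value B assigns to a 0/1 prefix: increment it as a binary number, read in base 3
def Bv (pre : List Int) : Int := h3 (toDigits2 (h2v pre + 1))

-- A's else-branch value, after the zero-fill fold has been turned into a list literal
def Aout (ds : List Int) (p : Nat) : Int :=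
  if solve_scan ds (p : Int) = 0 then h3 ([1] ++ List.replicate ds.length 0)
  else h3 (ds.take ((solve_scan ds (p : Int)).toNat - 1) ++ [1] ++
        List.replicate (ds.length - (solve_scan ds (p : Int)).toNat) 0)

lemma h3_append_singleton (l : List Int) (d : Int) : h3 (l ++ [d]) = 3 * h3 l + d := by
  simp [h3, List.foldl_append]

lemma h2v_append_singleton (l : List Int) (d : Int) : h2v (l ++ [d]) = 2 * h2v l + d := by
  simp [h2v, List.foldl_append]

lemma h3_append_replicate (l : List Int) (m : Nat) :
    h3 (l ++ List.replicate m 0) = h3 l * 3 ^ m := by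
  induction m with
  | zero => simp
  | succ m ih =>
    rw [List.replicate_succ', ← List.append_assoc, h3_append_singleton, ih, pow_succ]
    ring

lemma h2v_gen_nonneg (l : List Int) : ∀ a : Int, 0 ≤ a → (∀ x ∈ l, 0 ≤ x) →
    0 ≤ l.foldl (fun v d => 2 * v + d) a := by
  induction l with
  | nil => intro a ha _; simpa using ha
  | cons x l ih =>
    intro a ha hl
    simp only [List.foldl_cons]
    exact ih _ (by have := hl x (by simp); omega) (fun x hx => hl x (by simp [hx]))

lemma h2v_nonneg (l : List Int) (hl : ∀ x ∈ l, 0 ≤ x) : 0 ≤ h2v l :=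
  h2v_gen_nonneg l 0 le_rfl hl

lemma h3_eq_zero (l : List Int) (hl : ∀ x ∈ l, 0 ≤ x) (h : h2v l = 0) : h3 l = 0 := by
  induction l using List.reverseRecOn with
  | nil => simp [h3]
  | append_singleton l d ih =>
    have hl' : ∀ x ∈ l, 0 ≤ x := fun x hx => hl x (by simp [hx])
    have hd : 0 ≤ d := hl d (by simp)
    have hm : 0 ≤ h2v l := h2v_nonneg l hl'
    rw [h2v_append_singleton] at h
    rw [h3_append_singleton, ih hl' (by omega)]
    omega

lemma td2_nonpos {n : Int} (h : n ≤ 0) : toDigits2 n = [] := by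
  rw [toDigits2]; simp [show ¬ 0 < n by omega]

lemma td2_pos {n : Int} (h : 0 < n) :
    toDigits2 n = toDigits2 (PySem.Int.floordiv n 2) ++ [PySem.Int.mod n 2] := by
  rw [toDigits2]; simp [h]

lemma td2_double (m : Int) (h : 0 < m) : toDigits2 (2 * m) = toDigits2 m ++ [0] := by
  rw [td2_pos (by omega)]
  have h1 : PySem.Int.floordiv (2 * m) 2 = m := by
    rw [PySem.Int.floordiv_eq_ediv_of_pos (by omega)]; omega
  have h2 : PySem.Int.mod (2 * m) 2 = 0 := by
    rw [PySem.Int.mod_eq_emod_of_pos (by omega)]; omega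
  rw [h1, h2]

lemma td2_double_add_one (m : Int) (h : 0 ≤ m) :
    toDigits2 (2 * m + 1) = toDigits2 m ++ [1] := by
  rw [td2_pos (by omega)]
  have h1 : PySem.Int.floordiv (2 * m + 1) 2 = m := by
    rw [PySem.Int.floordiv_eq_ediv_of_pos (by omega)]; omega
  have h2 : PySem.Int.mod (2 * m + 1) 2 = 1 := by
    rw [PySem.Int.mod_eq_emod_of_pos (by omega)]; omega
  rw [h1, h2]

lemma strip (l : List Int) (hl : ∀ x ∈ l, x = 0 ∨ x = 1) :
    h3 (toDigits2 (h2v l)) = h3 l := by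
  induction l using List.reverseRecOn with
  | nil => simp [h2v, h3, td2_nonpos le_rfl]
  | append_singleton l d ih =>
    have hl' : ∀ x ∈ l, x = 0 ∨ x = 1 := fun x hx => hl x (by simp [hx])
    have hm : 0 ≤ h2v l := h2v_nonneg l (fun x hx => by rcases hl' x hx with rfl | rfl <;> omega)
    rw [h2v_append_singleton]
    rcases hl d (by simp) with rfl | rfl
    · rcases eq_or_lt_of_le hm with he | hpos
      · rw [show 2 * h2v l + 0 = 0 by omega, td2_nonpos le_rfl, h3_append_singleton,
          h3_eq_zero l (fun x hx => by rcases hl' x hx with rfl | rfl <;> omega) he.symm]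
        simp [h3]
      · rw [show 2 * h2v l + 0 = 2 * h2v l by ring, td2_double _ hpos,
          h3_append_singleton, h3_append_singleton, ih hl']
    · rw [td2_double_add_one _ hm, h3_append_singleton, h3_append_singleton, ih hl']

lemma Bv_nil : Bv [] = 1 := by
  have : h2v [] + 1 = 2 * 0 + 1 := by simp [h2v]
  rw [Bv, this, td2_double_add_one 0 le_rfl, td2_nonpos le_rfl]
  simp [h3]

lemma Bv_append_zero (l : List Int) (hl : ∀ x ∈ l, x = 0 ∨ x = 1) :
    Bv (l ++ [0]) = 3 * h3 l + 1 := by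
  have hm : 0 ≤ h2v l := h2v_nonneg l (fun x hx => by rcases hl x hx with rfl | rfl <;> omega)
  rw [Bv, h2v_append_singleton, show 2 * h2v l + 0 + 1 = 2 * h2v l + 1 by ring,
    td2_double_add_one _ hm, h3_append_singleton, strip l hl]

lemma Bv_append_one (l : List Int) (hl : ∀ x ∈ l, x = 0 ∨ x = 1) :
    Bv (l ++ [1]) = 3 * Bv l := by
  have hm : 0 ≤ h2v l := h2v_nonneg l (fun x hx => by rcases hl x hx with rfl | rfl <;> omega)
  rw [Bv, h2v_append_singleton, show 2 * h2v l + 1 + 1 = 2 * (h2v l + 1) by ring,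
    td2_double _ (by omega), h3_append_singleton, Bv]
  ring

lemma scan_zero (ds : List Int) : solve_scan ds 0 = 0 := by
  rw [solve_scan]; norm_num

lemma scan_succ_one (ds : List Int) (p : Nat) (h : ds.getD p 0 = 1) :
    solve_scan ds ((p : Int) + 1) = solve_scan ds (p : Int) := by
  rw [solve_scan]
  have hc : ((p : Int) + 1) - 1 = (p : Int) := by ring
  rw [dif_pos]
  · rw [hc]
  · refine ⟨by omega, ?_⟩
    rw [hc, PySem.List.pyGetD_natCast, h]

lemma scan_succ_ne (ds : List Int) (p : Nat) (h : ds.getD p 0 ≠ 1) :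
    solve_scan ds ((p : Int) + 1) = (p : Int) + 1 := by
  rw [solve_scan]
  have hc : ((p : Int) + 1) - 1 = (p : Int) := by ring
  rw [dif_neg]
  intro ⟨_, hb⟩
  rw [hc, PySem.List.pyGetD_natCast] at hb
  exact h hb

lemma scan_bounds (ds : List Int) (p : Nat) :
    0 ≤ solve_scan ds (p : Int) ∧ solve_scan ds (p : Int) ≤ (p : Int) := by
  induction p with
  | zero => simp [scan_zero]
  | succ p ih =>
    by_cases h : ds.getD p 0 = 1
    · rw [Nat.cast_succ, scan_succ_one ds p h]; omega
    · rw [Nat.cast_succ, scan_succ_ne ds p h]; omega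

lemma take_set_succ (t : List Int) (k : Nat) (h : k < t.length) (v : Int) :
    (t.set k v).take (k + 1) = t.take k ++ [v] := by
  rw [List.set_eq_take_append_cons_drop, if_pos h]
  have hlen : (t.take k).length = k := by simp [h.le]
  rw [show k + 1 = (t.take k).length + 1 by rw [hlen]]
  simp [List.take_append]

lemma zero_fill (m : Nat) : ∀ (a : Nat) (t : List Int), a + m = t.length →
    (PySem.List.pyRange (a : Int) (t.length : Int) 1).foldl
      (fun t i => PySem.List.pySetD t i 0) t = t.take a ++ List.replicate m 0 := by
  induction m with
  | zero =>
    intro a t h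
    have ha : a = t.length := by omega
    subst ha
    rw [PySem.List.pyRange_one_eq_nil le_rfl]
    simp
  | succ m ih =>
    intro a t h
    have hab : (a : Int) < (t.length : Int) := by exact_mod_cast (by omega : a < t.length)
    rw [PySem.List.pyRange_one_cons hab]
    simp only [List.foldl_cons, PySem.List.pySetD_natCast]
    have hlen : (t.set a 0).length = t.length := by simp
    have hih := ih (a + 1) (t.set a 0) (by rw [hlen]; omega)
    rw [hlen] at hih
    rw [show ((a : Int) + 1) = ((a + 1 : Nat) : Int) by push_cast; ring, hih,
      take_set_succ t a (by omega) 0, List.replicate_succ, List.append_assoc]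
    simp

lemma zero_fill_apply (ds : List Int) (pos : Nat) (h1 : 1 ≤ pos) (h2 : pos ≤ ds.length) :
    (PySem.List.pyRange (pos : Int) (ds.length : Int) 1).foldl
      (fun t i => PySem.List.pySetD t i 0) (PySem.List.pySetD ds ((pos : Int) - 1) 1)
    = ds.take (pos - 1) ++ [1] ++ List.replicate (ds.length - pos) 0 := by
  have hc : ((pos : Int) - 1) = ((pos - 1 : Nat) : Int) := by omega
  rw [hc, PySem.List.pySetD_natCast]
  have hlen : (ds.set (pos - 1) 1).length = ds.length := by simp
  have htk : (ds.set (pos - 1) 1).take pos = ds.take (pos - 1) ++ [1] := by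
    have h := take_set_succ ds (pos - 1) (by omega) 1
    rwa [show pos - 1 + 1 = pos by omega] at h
  have hz := zero_fill (ds.length - pos) pos (ds.set (pos - 1) 1) (by rw [hlen]; omega)
  rw [hlen] at hz
  rw [hz, htk]

lemma main_carry (p : Nat) : ∀ (ds : List Int), p ≤ ds.length →
    (∀ x ∈ ds.take p, x = 0 ∨ x = 1) →
    Aout ds p = Bv (ds.take p) * 3 ^ (ds.length - p) := by
  induction p with
  | zero =>
    intro ds _ _
    unfold Aout
    rw [Nat.cast_zero, scan_zero, if_pos rfl]
    rw [show ([1] ++ List.replicate ds.length 0 : List Int) = [(1 : Int)] ++ List.replicate ds.length 0 from rfl,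
      h3_append_replicate]
    simp [h3, Bv_nil]
  | succ p ih =>
    intro ds hp hd
    have hplt : p < ds.length := by omega
    have htake : ds.take (p + 1) = ds.take p ++ [ds[p]] := by
      rw [List.take_succ, List.getElem?_eq_getElem hplt]
      rfl
    have hd' : ∀ x ∈ ds.take p, x = 0 ∨ x = 1 := by
      intro x hx
      exact hd x (by rw [htake]; exact List.mem_append_left _ hx)
    have hdp : ds[p] = 0 ∨ ds[p] = 1 :=
      hd _ (by rw [htake]; exact List.mem_append_right _ (by simp))
    have hgetD : ds.getD p 0 = ds[p] := List.getD_eq_getElem ds 0 hplt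
    rcases hdp with h0 | h1
    · have hs : solve_scan ds ((p + 1 : Nat) : Int) = (p : Int) + 1 := by
        rw [Nat.cast_succ]
        exact scan_succ_ne ds p (by rw [hgetD, h0]; norm_num)
      unfold Aout
      rw [hs, if_neg (by omega)]
      have ht : ((p : Int) + 1).toNat = p + 1 := by omega
      rw [ht, Nat.add_sub_cancel, h3_append_replicate, h3_append_singleton, htake, h0,
        Bv_append_zero _ hd']
    · have hs : solve_scan ds ((p + 1 : Nat) : Int) = solve_scan ds (p : Int) := by
        rw [Nat.cast_succ]
        exact scan_succ_one ds p (by rw [hgetD, h1])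
      have hmain := ih ds (by omega) hd'
      unfold Aout at hmain ⊢
      rw [hs, hmain, htake, h1, Bv_append_one _ hd']
      rw [show ds.length - p = (ds.length - (p + 1)) + 1 by omega, pow_succ]
      ring

-- ----- bridge: A's string-built digit list is B's digit list -----

lemma td3_nonpos {n : Int} (h : n ≤ 0) : toDigits3 n = [] := by
  rw [toDigits3]; simp [show ¬ 0 < n by omega]

lemma td3_pos {n : Int} (h : 0 < n) :
    toDigits3 n = toDigits3 (PySem.Int.floordiv n 3) ++ [PySem.Int.mod n 3] := by
  rw [toDigits3]; simp [h]

lemma td3_digits (n : Int) : ∀ x ∈ toDigits3 n, 0 ≤ x ∧ x < 3 := by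
  induction n using toDigits3.induct with
  | case1 n h ih =>
    rw [td3_pos h]
    intro x hx
    rcases List.mem_append.mp hx with hx | hx
    · exact ih x hx
    · rcases List.mem_singleton.mp hx with rfl
      exact ⟨PySem.Int.mod_nonneg n (by omega), PySem.Int.mod_lt n (by omega)⟩
  | case2 n h =>
    rw [td3_nonpos (by omega)]
    simp

lemma loop_eq : ∀ (n : Int) (acc : List String),
    np_base3_loop n acc = acc ++ ((toDigits3 n).reverse.map PySem.Int.toStr) := by
  intro n acc
  induction n, acc using np_base3_loop.induct with
  | case1 n digits h ih =>
    rw [np_base3_loop, dif_pos h, ih, td3_pos h]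
    simp
  | case2 n digits h =>
    rw [np_base3_loop, dif_neg h, td3_nonpos (by omega)]
    simp

-- Chars.join with an empty separator concatenates (specific instance used once below)
lemma join_nil_eq_flatten (l : List (List Char)) : PySem.Chars.join [] l = l.flatten := by
  simp only [PySem.Chars.join, List.intercalate]
  induction l with
  | nil => simp
  | cons x xs ih =>
    cases xs with
    | nil => simp
    | cons y ys => simp_all [List.intersperse]

lemma parse_digits (l : List Int) (hl : ∀ d ∈ l, 0 ≤ d ∧ d < 3) :
    ((PySem.Chars.join [] (l.map PySem.Int.toChars)).map
      (fun c => (PySem.Int.ofChars? [c]).getD 0)) = l := by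
  rw [join_nil_eq_flatten]
  induction l with
  | nil => simp
  | cons d t ih =>
    rw [List.map_cons, List.flatten_cons, List.map_append,
      ih (fun d hd => hl d (by simp [hd]))]
    have hd := hl d (by simp)
    have h3 : d = 0 ∨ d = 1 ∨ d = 2 := by omega
    rcases h3 with rfl | rfl | rfl <;> rfl

lemma tern_eq (n : Int) (h : 0 < n) :
    (np_base3 n).toList.map (fun c => (PySem.Int.ofChars? [c]).getD 0) = toDigits3 n := by
  rw [np_base3, if_neg (by omega), loop_eq n [], List.nil_append,
    ← List.map_reverse, List.reverse_reverse, PySem.Str.toList_join]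
  rw [String.toList_empty, List.map_map]
  rw [show (String.toList ∘ PySem.Int.toStr) = PySem.Int.toChars by
    funext d; simp [PySem.Int.toList_toStr]]
  exact parse_digits _ (td3_digits n)

lemma foldA_eq_h3 (l : List Int) : l.foldl (fun res d => res * 3 + d) 0 = h3 l := by
  rw [h3, show (fun (res d : Int) => res * 3 + d) = (fun r d => 3 * r + d) by
    funext r d; ring]

theorem solve_eq (n : Int) (hn : 0 ≤ n) : solve n = solve_alt n := by
  simp only [solve, solve_alt]
  rcases eq_or_lt_of_le hn with rfl | hpos
  · -- n = 0: A's digit list is [0], B's is []; neither contains 2, both return 0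
    rw [td3_nonpos le_rfl]
    have h0 : (np_base3 0).toList.map (fun c => (PySem.Int.ofChars? [c]).getD 0) = [0] := by
      rw [np_base3, if_pos rfl]; decide
    rw [h0]
    norm_num
  · rw [tern_eq n hpos]
    set ds := toDigits3 n with hds
    by_cases hc : ds.contains 2 = false
    · rw [if_pos hc, if_pos hc]
    · rw [if_neg hc, if_neg hc]
      have hmem : (2 : Int) ∈ ds := by simpa using hc
      obtain ⟨k, hk⟩ : ∃ k, PySem.List.index? ds 2 = some k :=
        Option.isSome_iff_exists.mp ((PySem.List.index?_isSome_iff ds 2).mpr hmem)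
      obtain ⟨pre, suf, hsplit, hlen, hnotin⟩ := (PySem.List.index?_eq_some_iff ds 2 k).mp hk
      have hkle : k < ds.length := by rw [hsplit]; simp; omega
      have htakek : ds.take k = pre := by rw [hsplit, ← hlen]; exact List.take_left ..
      have hd01 : ∀ x ∈ ds.take k, x = 0 ∨ x = 1 := by
        intro x hx
        rw [htakek] at hx
        have hx2 : x ≠ 2 := fun he => hnotin (he ▸ hx)
        have hb := td3_digits n x (by rw [← hds, hsplit]; exact List.mem_append_left _ hx)
        omega
      have hmain := main_carry k ds (le_of_lt hkle) hd01
      unfold Aout at hmain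
      rw [hk]
      simp only [Option.getD_some, PySem.List.len_eq, PySem.List.slice_to_natCast]
      rcases scan_bounds ds k with ⟨hs0, hsk⟩
      by_cases hz : solve_scan ds (k : Int) = 0
      · rw [if_pos hz] at hmain ⊢
        rw [PySem.List.pyRepeat_singleton, Int.toNat_natCast, foldA_eq_h3]
        simp only [Bv, h3, h2v] at hmain ⊢
        exact hmain
      · rw [if_neg hz] at hmain ⊢
        have hposnat : solve_scan ds (k : Int) = (((solve_scan ds (k : Int)).toNat : Nat) : Int) := by
          omega
        rw [hposnat, zero_fill_apply ds ((solve_scan ds (k : Int)).toNat) (by omega) (by omega),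
          foldA_eq_h3]
        simp only [Bv, h3, h2v] at hmain ⊢
        exact hmain

-- ===== VERDICT (by name: the statement is the Claim_ definition above) =====
theorem solve_spec : Claim_equal_solve := by
  intro n _ hpre
  unfold Spec_solve
  exact solve_eq n hpre
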